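-- pv_equiv track=rewrite | github.com/Maxbleu/f1analisys-scheduler | utils/path_utils.py | get_drivers_laps_path
-- ===== SOURCE A (Python) =====
-- def get_drivers_laps_path(drivers_laps_range: dict) -> str:
--     drivers_path = "/compare"
--     keys_list = list(drivers_laps_range.keys())
--     for driver in keys_list:
--         lap_range = drivers_laps_range[driver]
--         drivers_path += f"/{driver}"
--         for lap in lap_range:
--             drivers_path += f"/{lap}"
--         if keys_list.index(driver) < len(keys_list) - 1:
--             drivers_path += "/vs"
--     return drivers_path
-- ===== SOURCE B (Python) =====
-- def get_drivers_laps_path(drivers_laps_range: dict) -> str: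
--     tokens = ["compare"]
--     for driver, laps in drivers_laps_range.items():
--         tokens.append(driver)
--         tokens.extend(str(lap) for lap in laps)
--         tokens.append("vs")
--     if len(tokens) > 1:
--         tokens.pop()  # drop the trailing "vs"
--     return "/" + "/".join(tokens)
-- ===== Notes on version B (the rewrite author's own statement) =====
-- stated objective: alternative
-- what changed: B builds a flat token list (driver names, lap strings, and an unconditional 'vs' token per driver whose trailing occurrence is popped) and renders the whole path with a single '/'-join, whereas A accumulates a string fragment-by-fragment and decides each '/vs' separator with a keys_list.index positional check inside the loop.
import Mathlib
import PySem

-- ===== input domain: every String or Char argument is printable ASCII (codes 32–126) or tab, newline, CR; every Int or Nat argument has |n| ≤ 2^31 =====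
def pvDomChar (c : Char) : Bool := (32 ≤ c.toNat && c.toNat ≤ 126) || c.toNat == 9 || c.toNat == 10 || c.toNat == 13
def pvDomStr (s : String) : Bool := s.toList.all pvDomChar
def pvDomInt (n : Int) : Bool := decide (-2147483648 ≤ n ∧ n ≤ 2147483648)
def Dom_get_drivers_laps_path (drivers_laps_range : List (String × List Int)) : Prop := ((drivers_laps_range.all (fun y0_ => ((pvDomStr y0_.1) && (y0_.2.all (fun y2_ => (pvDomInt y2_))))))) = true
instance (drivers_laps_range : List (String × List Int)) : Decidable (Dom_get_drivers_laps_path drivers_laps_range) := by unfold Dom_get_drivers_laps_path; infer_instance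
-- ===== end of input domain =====

-- B builds a flat token list ("vs" per driver, trailing one popped) and emits the path with one "/"-join, replacing
-- A's indexed accumulation loop with its positional "/vs" branch (objective: alternative).

-- ===== PORT A =====
def get_drivers_laps_path (drivers_laps_range : List (String × List Int)) : String :=
  let keys_list := drivers_laps_range.map Prod.fst
  keys_list.foldl
    (fun drivers_path driver =>
      let lap_range := ((PySem.Dict.mk drivers_laps_range).get? driver).getD []
      let p1 := drivers_path ++ "/" ++ driver
      let p2 := lap_range.foldl (fun p lap => p ++ "/" ++ PySem.Int.toStr lap) p1
      if (PySem.List.index? keys_list driver).getD 0 < keys_list.length - 1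
      then p2 ++ "/vs" else p2)
    "/compare"

-- ===== PORT B =====
def get_drivers_laps_path_alt (drivers_laps_range : List (String × List Int)) : String :=
  let tokens := drivers_laps_range.foldl
    (fun ts dl => ts ++ (dl.1 :: dl.2.map PySem.Int.toStr ++ ["vs"])) ["compare"]
  let tokens := if 1 < tokens.length then tokens.dropLast else tokens
  "/" ++ PySem.Str.join "/" tokens

-- ===== PRECONDITION & SPEC =====
-- Pre_ excludes association lists with duplicate driver keys: they do not correspond to any
-- Python dict input (a dict cannot hold duplicate keys), so A's behaviour there is not defined
-- by the Python source.
def Pre_get_drivers_laps_path (drivers_laps_range : List (String × List Int)) : Prop :=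
  (drivers_laps_range.map Prod.fst).Nodup
instance (drivers_laps_range : List (String × List Int)) : Decidable (Pre_get_drivers_laps_path drivers_laps_range) := by unfold Pre_get_drivers_laps_path; infer_instance
def pvWitness_get_drivers_laps_path : (List (String × List Int)) := [("VER", [1, 3]), ("HAM", [2])]

def Spec_get_drivers_laps_path (drivers_laps_range : List (String × List Int)) (out : String) : Prop := out = get_drivers_laps_path_alt drivers_laps_range
instance (drivers_laps_range : List (String × List Int)) (out : String) : Decidable (Spec_get_drivers_laps_path drivers_laps_range out) := by unfold Spec_get_drivers_laps_path; infer_instance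

-- ===== CLAIM (what is proved, stated in full; the proofs are below) =====
def Claim_equal_get_drivers_laps_path : Prop := ∀ (drivers_laps_range : List (String × List Int)), Dom_get_drivers_laps_path drivers_laps_range → Pre_get_drivers_laps_path drivers_laps_range → Spec_get_drivers_laps_path drivers_laps_range (get_drivers_laps_path drivers_laps_range)

-- ===== LEMMAS AND PROOFS =====

-- proof helper: B's token list with the trailing "vs" already dropped
def pvTokens : List (String × List Int) → List String
  | [] => []
  | (driver, laps) :: rest =>
    let head := driver :: laps.map PySem.Int.toStr
    if rest = [] then head else head ++ "vs" :: pvTokens rest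

-- proof helper: the tokens one driver contributes inside B's loop
def pvBlock (dl : String × List Int) : List String :=
  dl.1 :: dl.2.map PySem.Int.toStr ++ ["vs"]

theorem pv_flat_ne_nil (dl : String × List Int) (xs : List (String × List Int)) :
    (dl :: xs).flatMap pvBlock ≠ [] := by
  simp [List.flatMap_cons, pvBlock]

theorem pv_dropLast_flat (xs : List (String × List Int)) :
    (xs.flatMap pvBlock).dropLast = pvTokens xs := by
  induction xs with
  | nil => simp [pvTokens]
  | cons dl xs ih =>
      cases xs with
      | nil =>
          simp only [List.flatMap_cons, List.flatMap_nil, List.append_nil, pvBlock]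
          rw [List.dropLast_concat]
          simp [pvTokens]
      | cons y ys =>
          rw [List.flatMap_cons,
              List.dropLast_append_of_ne_nil (pv_flat_ne_nil y ys), ih]
          simp [pvBlock, pvTokens, List.append_assoc]

-- str.join unfolding at the String level
theorem pv_join_nil (sep : String) : PySem.Str.join sep [] = "" := by
  apply String.toList_injective
  simp [PySem.Str.toList_join, PySem.Chars.join, List.intercalate]

theorem pv_join_single (sep x : String) : PySem.Str.join sep [x] = x := by
  apply String.toList_injective
  simp [PySem.Str.toList_join, PySem.Chars.join, List.intercalate]

theorem pv_join_cons_cons (sep x y : String) (xs : List String) :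
    PySem.Str.join sep (x :: y :: xs) = x ++ sep ++ PySem.Str.join sep (y :: xs) := by
  apply String.toList_injective
  simp [PySem.Str.toList_join, PySem.Chars.join, List.intercalate,
        String.toList_append]

theorem pv_join_empty_cons (x : String) (xs : List String) :
    PySem.Str.join "" (x :: xs) = x ++ PySem.Str.join "" xs := by
  cases xs with
  | nil => rw [pv_join_single, pv_join_nil, String.append_empty]
  | cons y ys =>
      rw [pv_join_cons_cons, String.append_empty]

-- per-driver segment of A's loop (what one iteration appends, given the whole list)
def pvSegA (xs : List (String × List Int)) (d : String) : String :=
  "/" ++ d ++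
    PySem.Str.join "" (((((PySem.Dict.mk xs).get? d).getD []).map (fun lap => "/" ++ PySem.Int.toStr lap))) ++
    (if (PySem.List.index? (xs.map Prod.fst) d).getD 0 < (xs.map Prod.fst).length - 1
     then "/vs" else "")

-- the value one driver entry contributes between "/vs" separators
def pvSegB (dl : String × List Int) : String :=
  "/" ++ dl.1 ++ PySem.Str.join "" (dl.2.map (fun lap => "/" ++ PySem.Int.toStr lap))

theorem pv_lap_loop (laps : List Int) (p : String) :
    laps.foldl (fun p lap => p ++ "/" ++ PySem.Int.toStr lap) p
      = p ++ PySem.Str.join "" (laps.map (fun lap => "/" ++ PySem.Int.toStr lap)) := by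
  induction laps generalizing p with
  | nil => simp [pv_join_nil]
  | cons l ls ih =>
      rw [List.foldl_cons, ih, List.map_cons, pv_join_empty_cons]
      simp [String.append_assoc]

theorem pv_A_loop (xs : List (String × List Int)) (ks : List String) (a : String) :
    ks.foldl
      (fun drivers_path driver =>
        let lap_range := ((PySem.Dict.mk xs).get? driver).getD []
        let p1 := drivers_path ++ "/" ++ driver
        let p2 := lap_range.foldl (fun p lap => p ++ "/" ++ PySem.Int.toStr lap) p1
        if (PySem.List.index? (xs.map Prod.fst) driver).getD 0 < (xs.map Prod.fst).length - 1
        then p2 ++ "/vs" else p2) a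
      = a ++ PySem.Str.join "" (ks.map (pvSegA xs)) := by
  induction ks generalizing a with
  | nil => simp [pv_join_nil]
  | cons k ks ih =>
      rw [List.foldl_cons, ih, List.map_cons, pv_join_empty_cons]
      simp only [pvSegA, pv_lap_loop]
      split_ifs with h <;> simp [String.append_assoc, String.append_empty]

theorem pv_A_eq_join (xs : List (String × List Int)) :
    get_drivers_laps_path xs =
      "/compare" ++ PySem.Str.join "" ((xs.map Prod.fst).map (pvSegA xs)) := by
  unfold get_drivers_laps_path
  exact pv_A_loop xs (xs.map Prod.fst) "/compare"

theorem pv_segA_head (dl : String × List Int) (xs : List (String × List Int)) :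
    pvSegA (dl :: xs) dl.1 = pvSegB dl ++ (if xs = [] then "" else "/vs") := by
  unfold pvSegA pvSegB
  rcases dl with ⟨d, laps⟩
  simp only [PySem.Dict.get?_mk_cons, BEq.rfl, if_pos, Option.getD_some, List.map_cons,
    PySem.List.index?_cons_self, List.length_cons]
  cases xs with
  | nil => simp
  | cons y ys => simp [String.append_assoc]

theorem pv_segA_tail (dl : String × List Int) (xs : List (String × List Int))
    (d : String) (hmem : d ∈ xs.map Prod.fst) (hne : dl.1 ≠ d) :
    pvSegA (dl :: xs) d = pvSegA xs d := by
  unfold pvSegA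
  have hget : (PySem.Dict.mk (dl :: xs)).get? d = (PySem.Dict.mk xs).get? d := by
    rcases dl with ⟨k, v⟩
    rw [PySem.Dict.get?_mk_cons]
    simp_all
  have hidx : PySem.List.index? ((dl :: xs).map Prod.fst) d
      = Option.map (· + 1) (PySem.List.index? (xs.map Prod.fst) d) := by
    simpa using PySem.List.index?_cons_of_ne (xs.map Prod.fst) hne
  have hne' : PySem.List.index? (xs.map Prod.fst) d ≠ none := by
    intro hnone
    rw [PySem.List.index?_eq_none_iff] at hnone
    exact hnone hmem
  obtain ⟨k, hk⟩ := Option.ne_none_iff_exists'.mp hne'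
  rw [hget, hidx, hk]
  simp only [Option.map_some, Option.getD_some, List.map_cons, List.length_cons]
  have hiff : (k + 1 < xs.length) ↔ (k < xs.length - 1) := by omega
  simp [hiff]

theorem pv_main (xs : List (String × List Int)) (hnd : (xs.map Prod.fst).Nodup) :
    PySem.Str.join "" ((xs.map Prod.fst).map (pvSegA xs))
      = PySem.Str.join "/vs" (xs.map pvSegB) := by
  induction xs with
  | nil => simp [pv_join_nil]
  | cons dl xs ih =>
      have hnd' : (xs.map Prod.fst).Nodup := (List.nodup_cons.mp (by simpa using hnd)).2
      have hnotmem : dl.1 ∉ xs.map Prod.fst := (List.nodup_cons.mp (by simpa using hnd)).1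
      have htail : (xs.map Prod.fst).map (pvSegA (dl :: xs)) = (xs.map Prod.fst).map (pvSegA xs) := by
        apply List.map_congr_left
        intro d hd
        exact pv_segA_tail dl xs d hd (fun h => hnotmem (h ▸ hd))
      simp only [List.map_cons, pv_join_empty_cons, htail, ih hnd', pv_segA_head]
      cases xs with
      | nil => simp [pv_join_nil, pv_join_single]
      | cons y ys =>
          simp only [List.map_cons, pv_join_cons_cons]
          simp [String.append_assoc]

-- slash-expansion: "/" prefixed to every token, concatenated
def pvSlashAll (ts : List String) : String :=
  PySem.Str.join "" (ts.map (fun t => "/" ++ t))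

theorem pv_slashAll_nil : pvSlashAll [] = "" := by
  simp [pvSlashAll, pv_join_nil]

theorem pv_slashAll_cons (t : String) (ts : List String) :
    pvSlashAll (t :: ts) = "/" ++ t ++ pvSlashAll ts := by
  simp [pvSlashAll, List.map_cons, pv_join_empty_cons, String.append_assoc]

theorem pv_slashAll_append (a b : List String) :
    pvSlashAll (a ++ b) = pvSlashAll a ++ pvSlashAll b := by
  induction a with
  | nil => simp [pv_slashAll_nil]
  | cons t ts ih =>
      simp [pv_slashAll_cons, ih, String.append_assoc]

-- a "/"-join with a leading "/" is exactly the slash-expansion (nonempty token list)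
theorem pv_slash_join (t : String) (ts : List String) :
    "/" ++ PySem.Str.join "/" (t :: ts) = pvSlashAll (t :: ts) := by
  induction ts generalizing t with
  | nil => rw [pv_join_single, pv_slashAll_cons, pv_slashAll_nil, String.append_empty]
  | cons y ys ih =>
      rw [pv_join_cons_cons, pv_slashAll_cons, ← ih y]
      simp [String.append_assoc]

-- slash-expanding B's token list yields the "/vs"-joined per-driver segments
theorem pv_tokens_eq (xs : List (String × List Int)) :
    pvSlashAll (pvTokens xs) = PySem.Str.join "/vs" (xs.map pvSegB) := by
  induction xs with
  | nil => simp [pvTokens, pv_slashAll_nil, pv_join_nil]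
  | cons dl xs ih =>
      rcases dl with ⟨d, laps⟩
      have hhead : pvSlashAll (d :: laps.map PySem.Int.toStr) = pvSegB (d, laps) := by
        rw [pv_slashAll_cons]
        simp [pvSlashAll, pvSegB, List.map_map, Function.comp_def, String.append_assoc]
      cases xs with
      | nil =>
          simp only [pvTokens, List.map_cons, List.map_nil, pv_join_single]
          exact hhead
      | cons y ys =>
          rw [show pvTokens ((d, laps) :: y :: ys)
                = (d :: laps.map PySem.Int.toStr) ++ ["vs"] ++ pvTokens (y :: ys) by
              simp [pvTokens],
              pv_slashAll_append, pv_slashAll_append, hhead, ih]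
          simp only [List.map_cons]
          rw [pv_join_cons_cons]
          simp [pv_slashAll_cons, pv_slashAll_nil, String.append_assoc]

theorem pv_B_eq_join (xs : List (String × List Int)) :
    get_drivers_laps_path_alt xs = "/compare" ++ PySem.Str.join "/vs" (xs.map pvSegB) := by
  unfold get_drivers_laps_path_alt
  rw [show (fun ts (dl : String × List Int) => ts ++ (dl.1 :: dl.2.map PySem.Int.toStr ++ ["vs"]))
        = (fun ts dl => ts ++ pvBlock dl) by funext ts dl; rfl,
      PySem.List.foldl_append_eq_flatMap]
  cases xs with
  | nil => simp [pv_join_single, pv_join_nil]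
  | cons dl xs =>
      have hne := pv_flat_ne_nil dl xs
      have hlen : 1 < (["compare"] ++ (dl :: xs).flatMap pvBlock).length := by
        cases h : (dl :: xs).flatMap pvBlock with
        | nil => exact absurd h hne
        | cons a l => simp
      simp only [if_pos hlen]
      rw [show (["compare"] ++ (dl :: xs).flatMap pvBlock).dropLast
            = "compare" :: ((dl :: xs).flatMap pvBlock).dropLast by
          simpa using List.dropLast_append_of_ne_nil (l' := ["compare"]) hne,
          pv_dropLast_flat, pv_slash_join, pv_slashAll_cons, pv_tokens_eq]
      simp

theorem pv_AB (xs : List (String × List Int)) (hnd : (xs.map Prod.fst).Nodup) :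
    get_drivers_laps_path xs = get_drivers_laps_path_alt xs := by
  rw [pv_A_eq_join, pv_main xs hnd, pv_B_eq_join]

-- ===== VERDICT (by name: the statement is the Claim_ definition above) =====
theorem get_drivers_laps_path_spec : Claim_equal_get_drivers_laps_path := by
  intro xs _ hpre
  unfold Spec_get_drivers_laps_path
  exact pv_AB xs hpre
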